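-- pv_equiv track=rewrite | github.com/dylan-murray/sigil | sigil/core/utils.py | _find_candidate_regions
-- ===== SOURCE A (Python) =====
-- def _find_candidate_regions(
--     file_lines: list[str], anchors: list[str], target_len: int
-- ) -> list[tuple[int, int]]:
--     hits: set[int] = set()
--     for anchor in anchors:
--         for i, line in enumerate(file_lines):
--             if anchor in line.strip():
--                 hits.add(i)
--
--     if not hits:
--         return []
--
--     regions: set[tuple[int, int]] = set()
--     flex = max(2, target_len // 3)
--     for length in range(target_len - flex, target_len + flex + 1):
--         if length < 1:
--             continue
--         for hit in hits:
--             for offset in range(-flex, flex + 1):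
--                 start = hit + offset
--                 end = start + length
--                 if start < 0 or end > len(file_lines):
--                     continue
--                 if any(start <= h < end for h in hits):
--                     regions.add((start, end))
--
--     if len(hits) >= 2:
--         first_hit = min(hits)
--         last_hit = max(hits)
--         if last_hit > first_hit:
--             span_start = first_hit
--             span_end = last_hit + 1
--             for pad in range(max(0, target_len - (span_end - span_start) - flex), flex + 1):
--                 end = span_end + pad
--                 if end <= len(file_lines):
--                     regions.add((span_start, end))
--
--     return sorted(regions)[:20]
-- ===== SOURCE B (Python) =====
-- from bisect import bisect_left
--
--
-- def _find_candidate_regions(file_lines, anchors, target_len):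
--     n = len(file_lines)
--     hits = sorted({
--         i for i, line in enumerate(file_lines)
--         if any(a in line.strip() for a in anchors)
--     })
--     if not hits:
--         return []
--
--     flex = max(2, target_len // 3)
--     starts = sorted({h + o for h in hits for o in range(-flex, flex + 1)})
--
--     regions = set()
--     for length in range(max(1, target_len - flex), target_len + flex + 1):
--         for start in starts:
--             end = start + length
--             if start < 0 or end > n:
--                 continue
--             j = bisect_left(hits, start)
--             if j < len(hits) and hits[j] < end:
--                 regions.add((start, end))
--
--     if len(hits) >= 2:
--         span_start = hits[0]
--         span_end = hits[-1] + 1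
--         for pad in range(max(0, target_len - (span_end - span_start) - flex), flex + 1):
--             end = span_end + pad
--             if end <= n:
--                 regions.add((span_start, end))
--
--     return sorted(regions)[:20]
-- ===== Notes on version B (the rewrite author's own statement) =====
-- stated objective: faster
-- what changed: B collects hits in one enumerate pass, sorts them once, deduplicates the candidate starts, and replaces A's inner 'any(start <= h < end for h in hits)' scan by a single bisect_left probe into the sorted hit list, so the per-(length,start) work drops from O(H) to O(log H).
import Mathlib
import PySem

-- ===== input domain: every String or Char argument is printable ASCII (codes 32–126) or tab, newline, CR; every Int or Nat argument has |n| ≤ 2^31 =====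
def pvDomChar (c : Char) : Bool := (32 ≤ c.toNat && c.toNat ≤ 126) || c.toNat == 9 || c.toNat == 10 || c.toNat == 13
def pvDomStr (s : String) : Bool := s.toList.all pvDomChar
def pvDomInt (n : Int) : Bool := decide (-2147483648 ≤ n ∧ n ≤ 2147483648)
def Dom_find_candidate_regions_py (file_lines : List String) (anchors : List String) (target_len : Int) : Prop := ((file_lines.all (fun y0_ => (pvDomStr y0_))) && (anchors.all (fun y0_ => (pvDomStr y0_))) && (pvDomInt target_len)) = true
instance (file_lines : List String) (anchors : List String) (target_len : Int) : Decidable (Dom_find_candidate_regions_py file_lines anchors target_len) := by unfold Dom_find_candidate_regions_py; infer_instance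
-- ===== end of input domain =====

-- B replaces A's inner linear scan over the hit set by a bisect probe into the once-sorted
-- hit list and deduplicates the candidate starts (objective: faster; return value only).

-- ===== PORT A =====
-- hits = set(); for anchor in anchors: for i, line in enumerate(file_lines): if anchor in line.strip(): hits.add(i)
def pvHitsA (file_lines : List String) (anchors : List String) : PySem.Set Int :=
  anchors.foldl (fun hits anchor =>
    (PySem.List.enumerate file_lines 0).foldl
      (fun hits p =>
        if PySem.Str.isIn anchor (PySem.Str.strip p.2) then PySem.Set.add hits p.1 else hits)
      hits) PySem.Set.empty

-- the triple loop over length / hit / offset, guarded by the linear 'any' scan over hits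
def pvMainA (n flex target_len : Int) (hits : PySem.Set Int) : PySem.Set (Int × Int) :=
  (PySem.List.pyRange (target_len - flex) (target_len + flex + 1) 1).foldl (fun regions length =>
    if length < 1 then regions
    else hits.foldl (fun regions hit =>
      (PySem.List.pyRange (-flex) (flex + 1) 1).foldl (fun regions offset =>
        if hit + offset < 0 ∨ hit + offset + length > n then regions
        else if hits.any (fun h => decide (hit + offset ≤ h) && decide (h < hit + offset + length))
          then PySem.Set.add regions (hit + offset, hit + offset + length)
          else regions) regions) regions) PySem.Set.empty

-- the span block: len(hits) >= 2, first_hit = min(hits), last_hit = max(hits)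
def pvSpanA (n flex target_len : Int) (hits : PySem.Set Int) (regions : PySem.Set (Int × Int)) :
    PySem.Set (Int × Int) :=
  if 2 ≤ PySem.Set.len hits then
    match PySem.List.min? hits (fun x => x), PySem.List.max? hits (fun x => x) with
    | some first_hit, some last_hit =>
      if first_hit < last_hit then
        (PySem.List.pyRange (max 0 (target_len - (last_hit + 1 - first_hit) - flex)) (flex + 1) 1).foldl
          (fun regions pad =>
            if last_hit + 1 + pad ≤ n then PySem.Set.add regions (first_hit, last_hit + 1 + pad)
            else regions) regions
      else regions
    | _, _ => regions
  else regions

def find_candidate_regions_py (file_lines : List String) (anchors : List String) (target_len : Int) : List (Int × Int) :=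
  let hits := pvHitsA file_lines anchors
  if hits = [] then []
  else
    let flex := max 2 (PySem.Int.floordiv target_len 3)
    let regions := pvSpanA (file_lines.length : Int) flex target_len hits
      (pvMainA (file_lines.length : Int) flex target_len hits)
    PySem.List.slice (PySem.List.sorted2 regions Prod.fst Prod.snd) none (some 20)

-- ===== PORT B =====
-- hits = sorted({i for i, line in enumerate(file_lines) if any(a in line.strip() for a in anchors)})
def pvHitsB (file_lines : List String) (anchors : List String) : List Int :=
  PySem.List.sorted
    (PySem.Set.ofList
      (((PySem.List.enumerate file_lines 0).filter
          (fun p => anchors.any (fun a => PySem.Str.isIn a (PySem.Str.strip p.2)))).map (·.1)))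
    (fun x => x)

-- starts = sorted({h + o for h in hits for o in range(-flex, flex + 1)})
def pvStartsB (flex : Int) (hits : List Int) : List Int :=
  PySem.List.sorted
    (PySem.Set.ofList (hits.flatMap (fun h => (PySem.List.pyRange (-flex) (flex + 1) 1).map (fun o => h + o))))
    (fun x => x)

-- the double loop over length / start, guarded by one bisect_left probe into the sorted hits
def pvMainB (n flex target_len : Int) (hits : List Int) (starts : List Int) : PySem.Set (Int × Int) :=
  (PySem.List.pyRange (max 1 (target_len - flex)) (target_len + flex + 1) 1).foldl (fun regions length =>
    starts.foldl (fun regions start =>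
      if start < 0 ∨ start + length > n then regions
      else
        let j := PySem.List.bisectLeft hits start
        if j < hits.length ∧ PySem.List.pyGetD hits (j : Int) 0 < start + length
          then PySem.Set.add regions (start, start + length)
          else regions) regions) PySem.Set.empty

-- span block on the sorted hit list: span_start = hits[0], span_end = hits[-1] + 1
def pvSpanB (n flex target_len : Int) (hits : List Int) (regions : PySem.Set (Int × Int)) :
    PySem.Set (Int × Int) :=
  if 2 ≤ hits.length then
    let span_start := PySem.List.pyGetD hits 0 0
    let span_end := PySem.List.pyGetD hits (-1) 0 + 1
    (PySem.List.pyRange (max 0 (target_len - (span_end - span_start) - flex)) (flex + 1) 1).foldl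
      (fun regions pad =>
        if span_end + pad ≤ n then PySem.Set.add regions (span_start, span_end + pad) else regions)
      regions
  else regions

def find_candidate_regions_py_alt (file_lines : List String) (anchors : List String) (target_len : Int) : List (Int × Int) :=
  let hits := pvHitsB file_lines anchors
  if hits = [] then []
  else
    let flex := max 2 (PySem.Int.floordiv target_len 3)
    let starts := pvStartsB flex hits
    let regions := pvSpanB (file_lines.length : Int) flex target_len hits
      (pvMainB (file_lines.length : Int) flex target_len hits starts)
    PySem.List.slice (PySem.List.sorted2 regions Prod.fst Prod.snd) none (some 20)


-- ===== PRECONDITION & SPEC =====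
def Spec_find_candidate_regions_py (file_lines : List String) (anchors : List String) (target_len : Int) (out : List (Int × Int)) : Prop := out = find_candidate_regions_py_alt file_lines anchors target_len
instance (file_lines : List String) (anchors : List String) (target_len : Int) (out : List (Int × Int)) : Decidable (Spec_find_candidate_regions_py file_lines anchors target_len out) := by unfold Spec_find_candidate_regions_py; infer_instance

-- ===== CLAIM (what is proved, stated in full; the proofs are below) =====
def Claim_equal_find_candidate_regions_py : Prop := ∀ (file_lines : List String) (anchors : List String) (target_len : Int), Dom_find_candidate_regions_py file_lines anchors target_len → Spec_find_candidate_regions_py file_lines anchors target_len (find_candidate_regions_py file_lines anchors target_len)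

-- ===== LEMMAS AND PROOFS =====

def pvIsHit (file_lines : List String) (anchors : List String) (x : Int) : Prop :=
  ∃ p ∈ PySem.List.enumerate file_lines 0,
    (∃ a ∈ anchors, PySem.Str.isIn a (PySem.Str.strip p.2) = true) ∧ x = p.1

theorem pv_mem_foldl {β γ : Type} (l : List β) (f : List γ → β → List γ) (C : β → γ → Prop)
    (hf : ∀ s b x, x ∈ f s b ↔ x ∈ s ∨ C b x) :
    ∀ s x, (x ∈ l.foldl f s ↔ x ∈ s ∨ ∃ b ∈ l, C b x) := by
  induction l with
  | nil => simp
  | cons b t ih =>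
    intro s x
    simp only [List.foldl_cons, ih, hf, List.mem_cons]
    constructor
    · rintro ((h | h) | ⟨b', hb', h⟩)
      · exact Or.inl h
      · exact Or.inr ⟨b, Or.inl rfl, h⟩
      · exact Or.inr ⟨b', Or.inr hb', h⟩
    · rintro (h | ⟨b', (rfl | hb'), h⟩)
      · exact Or.inl (Or.inl h)
      · exact Or.inl (Or.inr h)
      · exact Or.inr ⟨b', hb', h⟩

theorem pv_nodup_foldl {β γ : Type} (l : List β) (f : List γ → β → List γ)
    (hf : ∀ s b, s.Nodup → (f s b).Nodup) :
    ∀ s, s.Nodup → (l.foldl f s).Nodup := by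
  induction l with
  | nil => exact fun s h => h
  | cons b t ih => intro s hs; exact ih _ (hf s b hs)

theorem pv_inner_mem (file_lines : List String) (a : String) :
    ∀ s x, x ∈ (PySem.List.enumerate file_lines 0).foldl
      (fun hits p => if PySem.Str.isIn a (PySem.Str.strip p.2) then PySem.Set.add hits p.1 else hits) s ↔
      x ∈ s ∨ ∃ p ∈ PySem.List.enumerate file_lines 0,
        PySem.Str.isIn a (PySem.Str.strip p.2) = true ∧ x = p.1 := by
  apply pv_mem_foldl
  intro s p x
  split
  case isTrue h =>
    rw [PySem.Set.mem_add]
    exact Iff.intro (Or.imp_right (fun hx => ⟨h, hx⟩)) (Or.imp_right And.right)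
  case isFalse h =>
    exact Iff.intro Or.inl (fun hor => hor.elim id (fun hc => absurd hc.1 h))

theorem pvHitsA_mem (file_lines anchors : List String) (x : Int) :
    x ∈ pvHitsA file_lines anchors ↔ pvIsHit file_lines anchors x := by
  unfold pvHitsA pvIsHit
  rw [pv_mem_foldl anchors _
    (fun a x => ∃ p ∈ PySem.List.enumerate file_lines 0,
      PySem.Str.isIn a (PySem.Str.strip p.2) = true ∧ x = p.1)
    (fun s a x => pv_inner_mem file_lines a s x)]
  simp only [PySem.Set.empty, List.not_mem_nil, false_or]
  constructor
  · rintro ⟨a, ha, p, hp, hin, rfl⟩; exact ⟨p, hp, ⟨a, ha, hin⟩, rfl⟩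
  · rintro ⟨p, hp, ⟨a, ha, hin⟩, rfl⟩; exact ⟨a, ha, p, hp, hin, rfl⟩

theorem pvHitsA_nodup (file_lines anchors : List String) :
    (pvHitsA file_lines anchors).Nodup := by
  unfold pvHitsA
  apply pv_nodup_foldl
  · intro s a hs
    apply pv_nodup_foldl
    · intro s p hs
      split
      · exact PySem.Set.nodup_add _ _ hs
      · exact hs
    · exact hs
  · exact List.nodup_nil

theorem pvHitsB_mem (file_lines anchors : List String) (x : Int) :
    x ∈ pvHitsB file_lines anchors ↔ pvIsHit file_lines anchors x := by
  unfold pvHitsB pvIsHit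
  rw [PySem.List.mem_sorted, PySem.Set.mem_ofList]
  simp only [List.mem_map, List.mem_filter, List.any_eq_true]
  constructor
  · rintro ⟨p, ⟨hp, ha⟩, rfl⟩; exact ⟨p, hp, by simpa using ha, rfl⟩
  · rintro ⟨p, hp, ha, rfl⟩; exact ⟨p, ⟨hp, by simpa using ha⟩, rfl⟩

theorem pvHitsB_sorted (file_lines anchors : List String) :
    (pvHitsB file_lines anchors).Pairwise (· < ·) := by
  unfold pvHitsB
  exact PySem.List.sorted_ofList_pairwise_lt _

theorem pvHitsB_nodup (file_lines anchors : List String) :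
    (pvHitsB file_lines anchors).Nodup := by
  exact (pvHitsB_sorted file_lines anchors).imp (fun h => ne_of_lt h)

theorem pvHits_perm (file_lines anchors : List String) :
    (pvHitsA file_lines anchors).Perm (pvHitsB file_lines anchors) := by
  rw [List.perm_ext_iff_of_nodup (pvHitsA_nodup _ _) (pvHitsB_nodup _ _)]
  intro a
  rw [pvHitsA_mem, pvHitsB_mem]

-- the comparator Python's tuple sort uses (lexicographic on (Int, Int))
def pvBefore (a b : Int × Int) : Bool :=
  decide (a.1 < b.1) || (!decide (b.1 < a.1) && decide (a.2 < b.2))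

theorem pvBefore_trans {a b c : Int × Int} (h1 : pvBefore a b = true) (h2 : pvBefore b c = true) :
    pvBefore a c = true := by
  simp only [pvBefore] at *
  simp at *
  omega

theorem pvBefore_asymm {a b : Int × Int} (h : pvBefore a b = true) : pvBefore b a = false := by
  simp only [pvBefore] at *
  simp at *
  omega

theorem pvBefore_conn {a b : Int × Int} (h1 : pvBefore a b = false) (h2 : pvBefore b a = false) :
    a = b := by
  simp only [pvBefore] at *
  simp at *
  obtain ⟨x, y⟩ := a; obtain ⟨u, v⟩ := b
  simp only [Prod.mk.injEq]
  simp_all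
  constructor <;> omega

theorem pv_insertBy_nil (bf : Int × Int → Int × Int → Bool) (x : Int × Int) :
    PySem.List.insertBy bf x [] = [x] := rfl

theorem pv_insertBy_cons (bf : Int × Int → Int × Int → Bool) (x a : Int × Int) (t : List (Int × Int)) :
    PySem.List.insertBy bf x (a :: t) =
      if bf x a then x :: a :: t else a :: PySem.List.insertBy bf x t := rfl

theorem pv_insertBy_comm (x y : Int × Int) (l : List (Int × Int)) :
    PySem.List.insertBy pvBefore y (PySem.List.insertBy pvBefore x l) =
    PySem.List.insertBy pvBefore x (PySem.List.insertBy pvBefore y l) := by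
  induction l with
  | nil =>
    rcases hyx : pvBefore y x <;> rcases hxy : pvBefore x y
    · rw [pvBefore_conn hyx hxy]
    · simp [pv_insertBy_nil, pv_insertBy_cons, hyx, hxy]
    · simp [pv_insertBy_nil, pv_insertBy_cons, hyx, hxy]
    · exact absurd (pvBefore_asymm hxy) (by simp [hyx])
  | cons a t ih =>
    rcases hxa : pvBefore x a <;> rcases hya : pvBefore y a
    · simp [pv_insertBy_cons, hxa, hya, ih]
    · rcases hxy : pvBefore x y
      · simp [pv_insertBy_cons, hxa, hya, hxy]
      · exact absurd (pvBefore_trans hxy hya) (by simp [hxa])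
    · rcases hyx : pvBefore y x
      · simp [pv_insertBy_cons, hxa, hya, hyx]
      · exact absurd (pvBefore_trans hyx hxa) (by simp [hya])
    · rcases hyx : pvBefore y x <;> rcases hxy : pvBefore x y
      · rw [pvBefore_conn hyx hxy]
      · simp [pv_insertBy_cons, hxa, hya, hyx, hxy]
      · simp [pv_insertBy_cons, hxa, hya, hyx, hxy]
      · exact absurd (pvBefore_asymm hxy) (by simp [hyx])

theorem pv_sorted2_eq_of_perm (xs ys : List (Int × Int)) (h : xs.Perm ys) :
    PySem.List.sorted2 xs Prod.fst Prod.snd = PySem.List.sorted2 ys Prod.fst Prod.snd := by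
  unfold PySem.List.sorted2
  exact @List.Perm.foldl_eq _ _ _ _ _ ⟨fun acc a b => pv_insertBy_comm a b acc⟩ h []


theorem pv_pyGetD_zero (xs : List Int) (x : Int) (t : List Int) (hx : xs = x :: t) (d : Int) :
    PySem.List.pyGetD xs 0 d = x := by
  subst hx
  simp [PySem.List.pyGetD, PySem.List.pyGet?, PySem.List.pyIdx?]

theorem pv_pyGetD_neg_one (xs : List Int) (h : xs ≠ []) (d : Int) :
    PySem.List.pyGetD xs (-1) d = xs.getLast h := by
  have hlen : 0 < xs.length := List.length_pos_iff.mpr h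
  simp only [PySem.List.pyGetD, PySem.List.pyGet?, PySem.List.pyIdx?]
  have h1 : ¬ (0:Int) ≤ -1 := by omega
  have h2 : -(xs.length : Int) ≤ -1 := by omega
  simp only [h1, if_false, h2, if_true]
  have : xs.length - ((1:Int).toNat) < xs.length := by omega
  rw [List.getLast_eq_getElem]
  simp only [Option.bind_some]
  norm_num
  rw [List.getElem?_eq_getElem (by omega : xs.length - 1 < xs.length)]
  simp

theorem pv_bisect_iff (hits : List Int) (hs : hits.Pairwise (fun a b => a ≤ b)) (s e : Int) :
    (PySem.List.bisectLeft hits s < hits.length ∧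
       PySem.List.pyGetD hits ((PySem.List.bisectLeft hits s : Nat) : Int) 0 < e)
    ↔ ∃ h ∈ hits, s ≤ h ∧ h < e := by
  obtain ⟨hle, hlt, hge⟩ := PySem.List.bisectLeft_spec hits s hs
  constructor
  · rintro ⟨hjlen, hlt'⟩
    rw [PySem.List.pyGetD_natCast, List.getD_eq_getElem _ _ hjlen] at hlt'
    exact ⟨hits[PySem.List.bisectLeft hits s], List.getElem_mem _, hge _ hjlen le_rfl, hlt'⟩
  · rintro ⟨h, hmem, hsh, hhe⟩
    obtain ⟨k, hk, rfl⟩ := List.getElem_of_mem hmem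
    have hjk : PySem.List.bisectLeft hits s ≤ k := by
      by_contra hc
      exact absurd (hlt k hk (by omega)) (by omega)
    have hjlen : PySem.List.bisectLeft hits s < hits.length := lt_of_le_of_lt hjk hk
    refine ⟨hjlen, ?_⟩
    rw [PySem.List.pyGetD_natCast, List.getD_eq_getElem _ _ hjlen]
    rcases eq_or_lt_of_le hjk with heq | hlt2
    · exact heq ▸ hhe
    · exact lt_of_le_of_lt (List.pairwise_iff_getElem.mp hs _ k hjlen hk hlt2) hhe

theorem pvStartsB_mem (flex : Int) (hits : List Int) (s : Int) :
    s ∈ pvStartsB flex hits ↔ ∃ h ∈ hits, ∃ o, -flex ≤ o ∧ o < flex + 1 ∧ s = h + o := by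
  unfold pvStartsB
  rw [PySem.List.mem_sorted, PySem.Set.mem_ofList]
  simp only [List.mem_flatMap, List.mem_map, PySem.List.mem_pyRange_one]
  constructor
  · rintro ⟨h, hh, o, ⟨ho1, ho2⟩, rfl⟩; exact ⟨h, hh, o, ho1, ho2, rfl⟩
  · rintro ⟨h, hh, o, ho1, ho2, rfl⟩; exact ⟨h, hh, o, ⟨ho1, ho2⟩, rfl⟩

-- the common description of a main-loop region
def pvRegCond (file_lines anchors : List String) (n flex tl : Int) (x : Int × Int) : Prop :=
  ∃ L, (1 ≤ L ∧ tl - flex ≤ L ∧ L < tl + flex + 1) ∧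
    ∃ s, (∃ h, pvIsHit file_lines anchors h ∧ ∃ o, -flex ≤ o ∧ o < flex + 1 ∧ s = h + o) ∧
      ¬(s < 0 ∨ s + L > n) ∧ (∃ h', pvIsHit file_lines anchors h' ∧ s ≤ h' ∧ h' < s + L) ∧
      x = (s, s + L)

theorem pvMainA_mem (file_lines anchors : List String) (n flex tl : Int) (x : Int × Int) :
    x ∈ pvMainA n flex tl (pvHitsA file_lines anchors) ↔
      pvRegCond file_lines anchors n flex tl x := by
  unfold pvMainA
  rw [pv_mem_foldl _ _ (fun L x => ¬ L < 1 ∧ ∃ hit ∈ pvHitsA file_lines anchors,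
      ∃ o ∈ PySem.List.pyRange (-flex) (flex + 1) 1,
        ¬(hit + o < 0 ∨ hit + o + L > n) ∧
        ((pvHitsA file_lines anchors).any
          (fun h => decide (hit + o ≤ h) && decide (h < hit + o + L)) = true) ∧
        x = (hit + o, hit + o + L))]
  · simp only [PySem.Set.empty, List.not_mem_nil, false_or]
    constructor
    · rintro ⟨L, hL, hL1, hit, hhit, o, ho, hcond, hany, rfl⟩
      rw [PySem.List.mem_pyRange_one] at hL ho
      simp only [List.any_eq_true, Bool.and_eq_true, decide_eq_true_eq] at hany
      obtain ⟨h', hh', hb1, hb2⟩ := hany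
      exact ⟨L, ⟨by omega, by omega, by omega⟩, hit + o,
        ⟨hit, (pvHitsA_mem _ _ _).mp hhit, o, ho.1, ho.2, rfl⟩, hcond,
        ⟨h', (pvHitsA_mem _ _ _).mp hh', hb1, hb2⟩, rfl⟩
    · rintro ⟨L, ⟨hL1, hL2, hL3⟩, s, ⟨hit, hhit, o, ho1, ho2, rfl⟩, hcond, ⟨h', hh', hb1, hb2⟩, rfl⟩
      refine ⟨L, PySem.List.mem_pyRange_one.mpr ⟨by omega, by omega⟩, by omega,
        hit, (pvHitsA_mem _ _ _).mpr hhit, o, PySem.List.mem_pyRange_one.mpr ⟨ho1, ho2⟩,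
        hcond, ?_, rfl⟩
      simp only [List.any_eq_true, Bool.and_eq_true, decide_eq_true_eq]
      exact ⟨h', (pvHitsA_mem _ _ _).mpr hh', hb1, hb2⟩
  · intro s L x
    split
    case isTrue h =>
      exact Iff.intro Or.inl (fun hor => hor.elim id (fun hc => absurd h hc.1))
    case isFalse h =>
      rw [pv_mem_foldl _ _ (fun hit x => ∃ o ∈ PySem.List.pyRange (-flex) (flex + 1) 1,
          ¬(hit + o < 0 ∨ hit + o + L > n) ∧
          ((pvHitsA file_lines anchors).any
            (fun h => decide (hit + o ≤ h) && decide (h < hit + o + L)) = true) ∧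
          x = (hit + o, hit + o + L))]
      · constructor
        · rintro (hs | ⟨hit, hhit, hrest⟩)
          · exact Or.inl hs
          · exact Or.inr ⟨h, hit, hhit, hrest⟩
        · rintro (hs | ⟨_, hit, hhit, hrest⟩)
          · exact Or.inl hs
          · exact Or.inr ⟨hit, hhit, hrest⟩
      · intro s hit x
        apply pv_mem_foldl
        intro s o x
        split
        case isTrue hc =>
          exact Iff.intro Or.inl (fun hor => hor.elim id (fun hc' => absurd hc hc'.1))
        case isFalse hc =>
          split
          case isTrue hc2 =>
            rw [PySem.Set.mem_add]
            exact Iff.intro (Or.imp_right (fun hx => ⟨hc, hc2, hx⟩))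
              (Or.imp_right (fun c => c.2.2))
          case isFalse hc2 =>
            exact Iff.intro Or.inl (fun hor => hor.elim id (fun c => absurd c.2.1 hc2))

theorem pvMainB_mem (file_lines anchors : List String) (n flex tl : Int) (x : Int × Int) :
    x ∈ pvMainB n flex tl (pvHitsB file_lines anchors) (pvStartsB flex (pvHitsB file_lines anchors)) ↔
      pvRegCond file_lines anchors n flex tl x := by
  have hsorted : (pvHitsB file_lines anchors).Pairwise (fun a b => a ≤ b) :=
    (pvHitsB_sorted file_lines anchors).imp (fun h => le_of_lt h)
  unfold pvMainB
  rw [pv_mem_foldl _ _ (fun L x => ∃ st ∈ pvStartsB flex (pvHitsB file_lines anchors),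
      ¬(st < 0 ∨ st + L > n) ∧
      (PySem.List.bisectLeft (pvHitsB file_lines anchors) st < (pvHitsB file_lines anchors).length ∧
        PySem.List.pyGetD (pvHitsB file_lines anchors)
          ((PySem.List.bisectLeft (pvHitsB file_lines anchors) st : Nat) : Int) 0 < st + L) ∧
      x = (st, st + L))]
  · simp only [PySem.Set.empty, List.not_mem_nil, false_or]
    constructor
    · rintro ⟨L, hL, st, hst, hcond, hbis, rfl⟩
      rw [PySem.List.mem_pyRange_one] at hL
      rw [pv_bisect_iff _ hsorted] at hbis
      obtain ⟨h', hh', hb1, hb2⟩ := hbis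
      obtain ⟨h, hh, o, ho1, ho2, rfl⟩ := (pvStartsB_mem _ _ _).mp hst
      exact ⟨L, ⟨by omega, by omega, by omega⟩, h + o,
        ⟨h, (pvHitsB_mem _ _ _).mp hh, o, ho1, ho2, rfl⟩, hcond,
        ⟨h', (pvHitsB_mem _ _ _).mp hh', hb1, hb2⟩, rfl⟩
    · rintro ⟨L, ⟨hL1, hL2, hL3⟩, s, ⟨h, hh, o, ho1, ho2, rfl⟩, hcond, ⟨h', hh', hb1, hb2⟩, rfl⟩
      refine ⟨L, PySem.List.mem_pyRange_one.mpr ⟨by omega, by omega⟩, h + o,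
        (pvStartsB_mem _ _ _).mpr ⟨h, (pvHitsB_mem _ _ _).mpr hh, o, ho1, ho2, rfl⟩,
        hcond, ?_, rfl⟩
      rw [pv_bisect_iff _ hsorted]
      exact ⟨h', (pvHitsB_mem _ _ _).mpr hh', hb1, hb2⟩
  · intro s L x
    apply pv_mem_foldl
    intro s st x
    split
    case isTrue hc =>
      exact Iff.intro Or.inl (fun hor => hor.elim id (fun hc' => absurd hc hc'.1))
    case isFalse hc =>
      show x ∈ (if PySem.List.bisectLeft (pvHitsB file_lines anchors) st < (pvHitsB file_lines anchors).length ∧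
          PySem.List.pyGetD (pvHitsB file_lines anchors)
            ((PySem.List.bisectLeft (pvHitsB file_lines anchors) st : Nat) : Int) 0 < st + L
          then PySem.Set.add s (st, st + L) else s) ↔ _
      split
      case isTrue hc2 =>
        rw [PySem.Set.mem_add]
        exact Iff.intro (Or.imp_right (fun hx => ⟨hc, hc2, hx⟩))
          (Or.imp_right (fun c => c.2.2))
      case isFalse hc2 =>
        exact Iff.intro Or.inl (fun hor => hor.elim id (fun c => absurd c.2.1 hc2))

theorem pvHits_length_eq (file_lines anchors : List String) :
    (pvHitsA file_lines anchors).length = (pvHitsB file_lines anchors).length :=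
  (pvHits_perm file_lines anchors).length_eq

theorem pv_min_eq (file_lines anchors : List String) (hne : pvHitsB file_lines anchors ≠ []) :
    PySem.List.min? (pvHitsA file_lines anchors) (fun x => x) =
      some (PySem.List.pyGetD (pvHitsB file_lines anchors) 0 0) := by
  obtain ⟨b, t, hbt⟩ := List.exists_cons_of_ne_nil hne
  rw [pv_pyGetD_zero _ b t hbt]
  have hAne : pvHitsA file_lines anchors ≠ [] := by
    intro hA
    exact hne (List.eq_nil_of_length_eq_zero (by rw [← pvHits_length_eq, hA, List.length_nil]))
  rcases hmin : PySem.List.min? (pvHitsA file_lines anchors) (fun x => x) with _ | m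
  · exact absurd ((PySem.List.min?_eq_none_iff _ _).mp hmin) hAne
  · have hmB : m ∈ pvHitsB file_lines anchors :=
      (pvHitsB_mem _ _ _).mpr ((pvHitsA_mem _ _ _).mp (PySem.List.min?_mem hmin))
    have hbA : b ∈ pvHitsA file_lines anchors := by
      rw [pvHitsA_mem, ← pvHitsB_mem, hbt]; exact List.mem_cons_self
    have h1 : m ≤ b := PySem.List.min?_isMin hmin b hbA
    have h2 : b ≤ m := by
      have hpw := pvHitsB_sorted file_lines anchors
      rw [hbt] at hmB hpw
      rcases List.mem_cons.mp hmB with rfl | hmt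
      · exact le_refl m
      · exact le_of_lt ((List.pairwise_cons.mp hpw).1 m hmt)
    rw [le_antisymm h1 h2]

theorem pv_max_eq (file_lines anchors : List String) (hne : pvHitsB file_lines anchors ≠ []) :
    PySem.List.max? (pvHitsA file_lines anchors) (fun x => x) =
      some (PySem.List.pyGetD (pvHitsB file_lines anchors) (-1) 0) := by
  rw [pv_pyGetD_neg_one _ hne]
  have hAne : pvHitsA file_lines anchors ≠ [] := by
    intro hA
    exact hne (List.eq_nil_of_length_eq_zero (by rw [← pvHits_length_eq, hA, List.length_nil]))
  rcases hmax : PySem.List.max? (pvHitsA file_lines anchors) (fun x => x) with _ | m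
  · exact absurd ((PySem.List.max?_eq_none_iff _ _).mp hmax) hAne
  · have hmB : m ∈ pvHitsB file_lines anchors :=
      (pvHitsB_mem _ _ _).mpr ((pvHitsA_mem _ _ _).mp (PySem.List.max?_mem hmax))
    have hlA : (pvHitsB file_lines anchors).getLast hne ∈ pvHitsA file_lines anchors := by
      rw [pvHitsA_mem, ← pvHitsB_mem]; exact List.getLast_mem hne
    have h1 : (pvHitsB file_lines anchors).getLast hne ≤ m :=
      PySem.List.max?_isMax hmax _ hlA
    have h2 : m ≤ (pvHitsB file_lines anchors).getLast hne := by
      have hpw := pvHitsB_sorted file_lines anchors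
      obtain ⟨k, hk, hkm⟩ := List.getElem_of_mem hmB
      rw [List.getLast_eq_getElem]
      rcases Nat.lt_or_ge k ((pvHitsB file_lines anchors).length - 1) with hlt | hge
      · exact hkm ▸ le_of_lt (List.pairwise_iff_getElem.mp hpw k _ hk (by omega) hlt)
      · have : k = (pvHitsB file_lines anchors).length - 1 := by omega
        subst this; rw [hkm]
    rw [le_antisymm h2 h1]

theorem pv_first_lt_last (file_lines anchors : List String)
    (h2 : 2 ≤ (pvHitsB file_lines anchors).length) :
    PySem.List.pyGetD (pvHitsB file_lines anchors) 0 0 <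
      PySem.List.pyGetD (pvHitsB file_lines anchors) (-1) 0 := by
  have hne : pvHitsB file_lines anchors ≠ [] := by
    intro h; rw [h] at h2; simp at h2
  obtain ⟨b, t, hbt⟩ := List.exists_cons_of_ne_nil hne
  rw [pv_pyGetD_zero _ b t hbt, pv_pyGetD_neg_one _ hne, List.getLast_eq_getElem]
  have hb0 : (pvHitsB file_lines anchors)[0]'(by omega) = b :=
    (List.getElem_of_eq hbt _).trans rfl
  have := List.pairwise_iff_getElem.mp (pvHitsB_sorted file_lines anchors) 0
    ((pvHitsB file_lines anchors).length - 1) (by omega) (by omega) (by omega)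
  rw [hb0] at this
  exact this

-- the common description of a span region
def pvSpanCond (file_lines anchors : List String) (n flex tl : Int) (x : Int × Int) : Prop :=
  2 ≤ (pvHitsB file_lines anchors).length ∧
  ∃ pad ∈ PySem.List.pyRange
      (max 0 (tl - (PySem.List.pyGetD (pvHitsB file_lines anchors) (-1) 0 + 1 -
        PySem.List.pyGetD (pvHitsB file_lines anchors) 0 0) - flex)) (flex + 1) 1,
    PySem.List.pyGetD (pvHitsB file_lines anchors) (-1) 0 + 1 + pad ≤ n ∧
    x = (PySem.List.pyGetD (pvHitsB file_lines anchors) 0 0,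
         PySem.List.pyGetD (pvHitsB file_lines anchors) (-1) 0 + 1 + pad)

theorem pv_span_step_mem (first last n : Int) (lo hi : Int) :
    ∀ s x, x ∈ (PySem.List.pyRange lo hi 1).foldl
      (fun regions pad =>
        if last + 1 + pad ≤ n then PySem.Set.add regions (first, last + 1 + pad) else regions) s ↔
      x ∈ s ∨ ∃ pad ∈ PySem.List.pyRange lo hi 1,
        last + 1 + pad ≤ n ∧ x = (first, last + 1 + pad) := by
  apply pv_mem_foldl
  intro s pad x
  split
  case isTrue hc =>
    rw [PySem.Set.mem_add]
    exact Iff.intro (Or.imp_right (fun hx => ⟨hc, hx⟩)) (Or.imp_right (fun c => c.2))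
  case isFalse hc =>
    exact Iff.intro Or.inl (fun hor => hor.elim id (fun c => absurd c.1 hc))

theorem pvSpanB_mem (file_lines anchors : List String) (n flex tl : Int)
    (R : PySem.Set (Int × Int)) (x : Int × Int) :
    x ∈ pvSpanB n flex tl (pvHitsB file_lines anchors) R ↔
      x ∈ R ∨ pvSpanCond file_lines anchors n flex tl x := by
  unfold pvSpanB pvSpanCond
  split
  case isTrue h2 =>
    rw [pv_span_step_mem]
    constructor
    · rintro (hs | hrest)
      · exact Or.inl hs
      · exact Or.inr ⟨h2, hrest⟩
    · rintro (hs | ⟨_, hrest⟩)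
      · exact Or.inl hs
      · exact Or.inr hrest
  case isFalse h2 =>
    exact Iff.intro Or.inl (fun hor => hor.elim id (fun c => absurd c.1 h2))

theorem pvSpanA_mem (file_lines anchors : List String) (n flex tl : Int)
    (R : PySem.Set (Int × Int)) (x : Int × Int) :
    x ∈ pvSpanA n flex tl (pvHitsA file_lines anchors) R ↔
      x ∈ R ∨ pvSpanCond file_lines anchors n flex tl x := by
  unfold pvSpanA
  by_cases h2 : 2 ≤ (pvHitsB file_lines anchors).length
  · have hlen : 2 ≤ PySem.Set.len (pvHitsA file_lines anchors) := by
      simp only [PySem.Set.len, pvHits_length_eq]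
      omega
    have hne : pvHitsB file_lines anchors ≠ [] := by
      intro h; rw [h] at h2; simp at h2
    rw [if_pos hlen]
    simp only [pv_min_eq file_lines anchors hne, pv_max_eq file_lines anchors hne]
    rw [if_pos (pv_first_lt_last file_lines anchors h2)]
    rw [pv_span_step_mem]
    unfold pvSpanCond
    constructor
    · rintro (hs | hrest)
      · exact Or.inl hs
      · exact Or.inr ⟨h2, hrest⟩
    · rintro (hs | ⟨_, hrest⟩)
      · exact Or.inl hs
      · exact Or.inr hrest
  · have hlen : ¬ 2 ≤ PySem.Set.len (pvHitsA file_lines anchors) := by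
      simp only [PySem.Set.len, pvHits_length_eq]
      omega
    rw [if_neg hlen]
    exact Iff.intro Or.inl (fun hor => hor.elim id (fun c => absurd c.1 h2))

theorem pvMainA_nodup (file_lines anchors : List String) (n flex tl : Int) :
    (pvMainA n flex tl (pvHitsA file_lines anchors)).Nodup := by
  unfold pvMainA
  apply pv_nodup_foldl
  · intro s L hs
    split
    · exact hs
    · apply pv_nodup_foldl _ _ (fun s hit hs => ?_) _ hs
      apply pv_nodup_foldl _ _ (fun s o hs => ?_) _ hs
      split
      · exact hs
      · split
        · exact PySem.Set.nodup_add _ _ hs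
        · exact hs
  · exact List.nodup_nil

theorem pvMainB_nodup (file_lines anchors : List String) (n flex tl : Int) :
    (pvMainB n flex tl (pvHitsB file_lines anchors) (pvStartsB flex (pvHitsB file_lines anchors))).Nodup := by
  unfold pvMainB
  apply pv_nodup_foldl
  · intro s L hs
    apply pv_nodup_foldl _ _ (fun s st hs => ?_) _ hs
    split
    · exact hs
    · show (if PySem.List.bisectLeft (pvHitsB file_lines anchors) st < (pvHitsB file_lines anchors).length ∧
          PySem.List.pyGetD (pvHitsB file_lines anchors)
            ((PySem.List.bisectLeft (pvHitsB file_lines anchors) st : Nat) : Int) 0 < st + L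
          then PySem.Set.add s (st, st + L) else s).Nodup
      split
      · exact PySem.Set.nodup_add _ _ hs
      · exact hs
  · exact List.nodup_nil

theorem pvSpanA_nodup (file_lines anchors : List String) (n flex tl : Int)
    (R : PySem.Set (Int × Int)) (hR : R.Nodup) :
    (pvSpanA n flex tl (pvHitsA file_lines anchors) R).Nodup := by
  unfold pvSpanA
  split
  · split
    · split
      · apply pv_nodup_foldl _ _ (fun s pad hs => ?_) _ hR
        split
        · exact PySem.Set.nodup_add _ _ hs
        · exact hs
      · exact hR
    · exact hR
  · exact hR

theorem pvSpanB_nodup (file_lines anchors : List String) (n flex tl : Int)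
    (R : PySem.Set (Int × Int)) (hR : R.Nodup) :
    (pvSpanB n flex tl (pvHitsB file_lines anchors) R).Nodup := by
  unfold pvSpanB
  split
  · apply pv_nodup_foldl _ _ (fun s pad hs => ?_) _ hR
    split
    · exact PySem.Set.nodup_add _ _ hs
    · exact hs
  · exact hR

theorem pv_regions_perm (file_lines anchors : List String) (flex tl : Int) :
    (pvSpanA (file_lines.length : Int) flex tl (pvHitsA file_lines anchors)
        (pvMainA (file_lines.length : Int) flex tl (pvHitsA file_lines anchors))).Perm
    (pvSpanB (file_lines.length : Int) flex tl (pvHitsB file_lines anchors)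
        (pvMainB (file_lines.length : Int) flex tl (pvHitsB file_lines anchors)
          (pvStartsB flex (pvHitsB file_lines anchors)))) := by
  rw [List.perm_ext_iff_of_nodup
    (pvSpanA_nodup _ _ _ _ _ _ (pvMainA_nodup _ _ _ _ _))
    (pvSpanB_nodup _ _ _ _ _ _ (pvMainB_nodup _ _ _ _ _))]
  intro x
  rw [pvSpanA_mem, pvSpanB_mem, pvMainA_mem, pvMainB_mem]

theorem pv_final (file_lines anchors : List String) (target_len : Int) :
    find_candidate_regions_py file_lines anchors target_len =
      find_candidate_regions_py_alt file_lines anchors target_len := by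
  unfold find_candidate_regions_py find_candidate_regions_py_alt
  have hlen := pvHits_length_eq file_lines anchors
  by_cases hA : pvHitsA file_lines anchors = []
  · rw [if_pos hA, if_pos (by
      apply List.eq_nil_of_length_eq_zero
      rw [← hlen, hA, List.length_nil])]
  · rw [if_neg hA, if_neg (by
      intro hB
      exact hA (List.eq_nil_of_length_eq_zero (by rw [hlen, hB, List.length_nil])))]
    show PySem.List.slice (PySem.List.sorted2
        (pvSpanA (file_lines.length : Int) (max 2 (PySem.Int.floordiv target_len 3)) target_len
          (pvHitsA file_lines anchors)
          (pvMainA (file_lines.length : Int) (max 2 (PySem.Int.floordiv target_len 3)) target_len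
            (pvHitsA file_lines anchors))) Prod.fst Prod.snd) none (some 20) =
      PySem.List.slice (PySem.List.sorted2
        (pvSpanB (file_lines.length : Int) (max 2 (PySem.Int.floordiv target_len 3)) target_len
          (pvHitsB file_lines anchors)
          (pvMainB (file_lines.length : Int) (max 2 (PySem.Int.floordiv target_len 3)) target_len
            (pvHitsB file_lines anchors)
            (pvStartsB (max 2 (PySem.Int.floordiv target_len 3)) (pvHitsB file_lines anchors))))
        Prod.fst Prod.snd) none (some 20)
    rw [pv_sorted2_eq_of_perm _ _
      (pv_regions_perm file_lines anchors (max 2 (PySem.Int.floordiv target_len 3)) target_len)]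

-- ===== VERDICT (by name: the statement is the Claim_ definition above) =====
theorem find_candidate_regions_py_spec : Claim_equal_find_candidate_regions_py := by
  intro file_lines anchors target_len _
  unfold Spec_find_candidate_regions_py
  exact pv_final file_lines anchors target_len
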